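-- pv_equiv track=rewrite | github.com/Yaksh-Projectkmt/OOM_ECG_DATABANK | analysis_tool/oea/OEA_arrhy_mi_detection.py | get_left_bounding_box
-- ===== SOURCE A (Python) =====
-- def get_left_bounding_box(leads, labels_and_boxes, right_leads_x_min, image_height):
--     selected_boxes = [box for label, box in labels_and_boxes if label in leads]
--
--     if not selected_boxes:
--         return None  # No leads detected for this side
--
--     x_min = min(box[0] for box in selected_boxes)
--     y_min = max(min(box[1] for box in selected_boxes) - 50, 0)  # Expand top, ensure within bounds
--     x_max = right_leads_x_min - 10  # Extend up to 10 pixels before right-side leads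
--     y_max = min(max(box[3] for box in selected_boxes) + 250, image_height)  # Expand bottom, ensure within bounds
--
--     return (x_min, y_min, x_max, y_max)
-- ===== SOURCE B (Python) =====
-- def get_left_bounding_box(leads, labels_and_boxes, right_leads_x_min, image_height):
--     acc = None
--     for label, box in labels_and_boxes:
--         if label in leads:
--             if acc is None:
--                 acc = (box[0], box[1], box[3])
--             else:
--                 acc = (min(acc[0], box[0]), min(acc[1], box[1]), max(acc[2], box[3]))
--     if acc is None:
--         return None
--     x_min, top, bottom = acc
--     return (x_min, max(top - 50, 0), right_leads_x_min - 10, min(bottom + 250, image_height))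
-- ===== Notes on version B (the rewrite author's own statement) =====
-- stated objective: alternative
-- what changed: Replaces the intermediate filtered list plus three separate min/max generator passes with a single loop that maintains a running (x_min, top, bottom) accumulator, clamping only once at the end.
import Mathlib
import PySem

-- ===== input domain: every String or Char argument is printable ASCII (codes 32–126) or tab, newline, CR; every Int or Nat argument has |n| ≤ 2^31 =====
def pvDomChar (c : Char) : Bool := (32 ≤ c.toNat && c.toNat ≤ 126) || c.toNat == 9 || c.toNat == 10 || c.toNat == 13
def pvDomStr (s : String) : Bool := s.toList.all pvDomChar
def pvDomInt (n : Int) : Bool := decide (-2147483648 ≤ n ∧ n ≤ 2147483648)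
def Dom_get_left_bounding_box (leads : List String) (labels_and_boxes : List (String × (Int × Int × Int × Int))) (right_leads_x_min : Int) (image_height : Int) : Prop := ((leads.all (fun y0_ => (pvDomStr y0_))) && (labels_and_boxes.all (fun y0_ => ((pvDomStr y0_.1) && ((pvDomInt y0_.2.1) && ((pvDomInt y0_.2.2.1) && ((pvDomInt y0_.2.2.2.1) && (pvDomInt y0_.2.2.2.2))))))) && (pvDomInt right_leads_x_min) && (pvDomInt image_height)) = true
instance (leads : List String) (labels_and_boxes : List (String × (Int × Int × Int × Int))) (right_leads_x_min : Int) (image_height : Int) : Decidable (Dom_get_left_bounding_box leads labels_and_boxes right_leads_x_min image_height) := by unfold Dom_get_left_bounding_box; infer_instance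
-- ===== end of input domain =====

-- B replaces A's filtered intermediate list plus three separate min/max passes by a
-- single loop maintaining a running (x_min, top, bottom) accumulator (objective: alternative).

-- ===== PORT A =====
-- A: build the filtered list, then take min over box[0], min over box[1], max over box[3]
-- (Python's min/max over a nonempty int sequence = left fold of min/max from the head).
def get_left_bounding_box (leads : List String) (labels_and_boxes : List (String × (Int × Int × Int × Int))) (right_leads_x_min : Int) (image_height : Int) : Option (Int × Int × Int × Int) :=
  let selected_boxes := (labels_and_boxes.filter (fun lb => leads.contains lb.1)).map (·.2)
  match selected_boxes with
  | [] => none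
  | b :: bs =>
    let x_min := bs.foldl (fun m bx => min m bx.1) b.1
    let y_min := max (bs.foldl (fun m bx => min m bx.2.1) b.2.1 - 50) 0
    let x_max := right_leads_x_min - 10
    let y_max := min (bs.foldl (fun m bx => max m bx.2.2.2) b.2.2.2 + 250) image_height
    some (x_min, y_min, x_max, y_max)

-- ===== PORT B =====
-- B's loop: one pass over labels_and_boxes with an optional running (x_min, top, bottom).
def pvLoopB (leads : List String) : List (String × (Int × Int × Int × Int)) → Option (Int × Int × Int) → Option (Int × Int × Int)
  | [], acc => acc
  | (label, box) :: rest, acc =>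
    if leads.contains label then
      match acc with
      | none => pvLoopB leads rest (some (box.1, box.2.1, box.2.2.2))
      | some (xm, t, bt) => pvLoopB leads rest (some (min xm box.1, min t box.2.1, max bt box.2.2.2))
    else
      pvLoopB leads rest acc

def get_left_bounding_box_alt (leads : List String) (labels_and_boxes : List (String × (Int × Int × Int × Int))) (right_leads_x_min : Int) (image_height : Int) : Option (Int × Int × Int × Int) :=
  match pvLoopB leads labels_and_boxes none with
  | none => none
  | some (x_min, top, bottom) =>
    some (x_min, max (top - 50) 0, right_leads_x_min - 10, min (bottom + 250) image_height)

-- ===== PRECONDITION & SPEC =====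
def Spec_get_left_bounding_box (leads : List String) (labels_and_boxes : List (String × (Int × Int × Int × Int))) (right_leads_x_min : Int) (image_height : Int) (out : Option (Int × Int × Int × Int)) : Prop := out = get_left_bounding_box_alt leads labels_and_boxes right_leads_x_min image_height
instance (leads : List String) (labels_and_boxes : List (String × (Int × Int × Int × Int))) (right_leads_x_min : Int) (image_height : Int) (out : Option (Int × Int × Int × Int)) : Decidable (Spec_get_left_bounding_box leads labels_and_boxes right_leads_x_min image_height out) := by unfold Spec_get_left_bounding_box; infer_instance

-- ===== CLAIM (what is proved, stated in full; the proofs are below) =====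
def Claim_equal_get_left_bounding_box : Prop := ∀ (leads : List String) (labels_and_boxes : List (String × (Int × Int × Int × Int))) (right_leads_x_min : Int) (image_height : Int), Dom_get_left_bounding_box leads labels_and_boxes right_leads_x_min image_height → Spec_get_left_bounding_box leads labels_and_boxes right_leads_x_min image_height (get_left_bounding_box leads labels_and_boxes right_leads_x_min image_height)

-- ===== LEMMAS AND PROOFS =====

-- once started, B's loop is the fold of the componentwise step over the filtered boxes
theorem pvLoopB_some (leads : List String) (l : List (String × (Int × Int × Int × Int))) (s : Int × Int × Int) :
    pvLoopB leads l (some s)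
      = some (((l.filter (fun lb => leads.contains lb.1)).map (·.2)).foldl
          (fun a bx => (min a.1 bx.1, min a.2.1 bx.2.1, max a.2.2 bx.2.2.2)) s) := by
  induction l generalizing s with
  | nil => simp [pvLoopB]
  | cons hd tl ih =>
    obtain ⟨label, box⟩ := hd
    by_cases h : label ∈ leads
    · simp [pvLoopB, h, ih]
    · simp [pvLoopB, h, ih]

-- B's loop from none = A's case split on the filtered list, with the triple fold
theorem pvLoopB_none (leads : List String) (l : List (String × (Int × Int × Int × Int))) :
    pvLoopB leads l none
      = match (l.filter (fun lb => leads.contains lb.1)).map (·.2) with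
        | [] => none
        | b :: bs => some (bs.foldl (fun a bx => (min a.1 bx.1, min a.2.1 bx.2.1, max a.2.2 bx.2.2.2))
            (b.1, b.2.1, b.2.2.2)) := by
  induction l with
  | nil => simp [pvLoopB]
  | cons hd tl ih =>
    obtain ⟨label, box⟩ := hd
    by_cases h : label ∈ leads
    · simp [pvLoopB, h, pvLoopB_some]
    · simp [pvLoopB, h, ih]

-- the triple fold computes the three independent folds componentwise
theorem fold_triple (bs : List (Int × Int × Int × Int)) (s : Int × Int × Int) :
    bs.foldl (fun a bx => (min a.1 bx.1, min a.2.1 bx.2.1, max a.2.2 bx.2.2.2)) s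
      = (bs.foldl (fun m bx => min m bx.1) s.1,
         bs.foldl (fun m bx => min m bx.2.1) s.2.1,
         bs.foldl (fun m bx => max m bx.2.2.2) s.2.2) := by
  induction bs generalizing s with
  | nil => rfl
  | cons b bs ih => simp [List.foldl_cons, ih]

-- ===== VERDICT (by name: the statement is the Claim_ definition above) =====
theorem get_left_bounding_box_spec : Claim_equal_get_left_bounding_box := by
  intro leads labs r h _
  unfold Spec_get_left_bounding_box get_left_bounding_box get_left_bounding_box_alt
  rw [pvLoopB_none]
  cases hsel : (labs.filter (fun lb => leads.contains lb.1)).map (·.2) with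
  | nil => simp
  | cons b bs => simp [fold_triple]
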